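-- pv_equiv track=rewrite | github.com/ishandutta2007/codeforces | fdg/normal/1/B.py | isFirst
-- ===== SOURCE A (Python) =====
-- def isFirst(s):
--     if s[0]!='R': return 0
--     for i in range(1,len(s)):
--         if s[i]<'0' or s[i]>'9':
--             if s[i]!='C' or i==1: return 0
--             else:
--                 for j in range(i+1,len(s)):
--                     if s[j]<'0' or s[j]>'9': return 0
--                 return 1
--     return 0
-- ===== SOURCE B (Python) =====
-- def isFirst(s):
--     if not s.startswith('R'):
--         return 0
--     r, sep, c = s[1:].partition('C')
--     ok = sep and r and all('0' <= ch <= '9' for ch in r) and all('0' <= ch <= '9' for ch in c)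
--     return 1 if ok else 0
-- ===== Notes on version B (the rewrite author's own statement) =====
-- stated objective: simpler
-- what changed: Replaces the indexed character scans with a declarative decomposition: strip the leading 'R', partition the rest at the first 'C', and check both sides are (non-empty / possibly empty) ASCII digit runs.
-- crash fix: On the empty string A raises IndexError (s[0]); B returns 0. — e.g. on isFirst(""): A raises IndexError, B returns 0
import Mathlib
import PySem

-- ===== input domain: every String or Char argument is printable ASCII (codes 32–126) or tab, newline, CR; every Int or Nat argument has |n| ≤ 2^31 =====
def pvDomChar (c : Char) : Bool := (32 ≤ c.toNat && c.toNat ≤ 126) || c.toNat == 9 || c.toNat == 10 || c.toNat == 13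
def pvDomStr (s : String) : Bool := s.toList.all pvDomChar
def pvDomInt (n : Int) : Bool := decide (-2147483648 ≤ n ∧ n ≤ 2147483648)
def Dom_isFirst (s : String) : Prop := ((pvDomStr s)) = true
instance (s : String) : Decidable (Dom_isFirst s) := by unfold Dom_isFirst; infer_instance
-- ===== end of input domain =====

-- B replaces A's indexed scans with startswith + partition-at-'C' + two digit-run checks (simpler); on "" A raises IndexError, B returns 0.

-- ===== PORT A =====
-- inner 'for j' loop: all remaining chars must be digits, else 0
def pvLoopJ : List Char → Int
  | [] => 1
  | c :: t => if c < '0' ∨ c > '9' then 0 else pvLoopJ t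

-- outer 'for i' loop over s[1:], i is the Python index
def pvLoopI : List Char → Nat → Int
  | [], _ => 0
  | c :: t, i =>
    if c < '0' ∨ c > '9' then
      if c ≠ 'C' ∨ i = 1 then 0 else pvLoopJ t
    else pvLoopI t (i + 1)

def isFirst (s : String) : Int :=
  match s.toList with
  | [] => 0   -- unreachable under Pre_: Python raises IndexError on s[0]
  | c0 :: rest => if c0 ≠ 'R' then 0 else pvLoopI rest 1

-- ===== PORT B =====
def pvDig (c : Char) : Bool := '0' ≤ c && c ≤ '9'

-- str.partition('C'): (before, found?, after)
def pvPartC : List Char → List Char × Bool × List Char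
  | [] => ([], false, [])
  | c :: t =>
    if c = 'C' then ([], true, t)
    else
      let (r, f, q) := pvPartC t
      (c :: r, f, q)

def isFirst_alt (s : String) : Int :=
  match s.toList with
  | [] => 0   -- startswith('R') is False
  | c0 :: rest =>
    if c0 ≠ 'R' then 0
    else
      let (r, f, q) := pvPartC rest
      if f ∧ r ≠ [] ∧ r.all pvDig ∧ q.all pvDig then 1 else 0

-- ===== PRECONDITION & SPEC =====
-- A raises IndexError on the empty string; Pre_ excludes exactly that input.
def Pre_isFirst (s : String) : Prop := s ≠ ""
instance (s : String) : Decidable (Pre_isFirst s) := by unfold Pre_isFirst; infer_instance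
def pvWitness_isFirst : String := "R23C55"

-- On the empty string A raises IndexError (s[0]); B returns 0.
def Raises_isFirst (s : String) : Prop := s = ""
instance (s : String) : Decidable (Raises_isFirst s) := by unfold Raises_isFirst; infer_instance
def pvRaiseWitness_isFirst : String := ""
def pvRaiseWitnessOut_isFirst : Int := 0

def Spec_isFirst (s : String) (out : Int) : Prop := out = isFirst_alt s
instance (s : String) (out : Int) : Decidable (Spec_isFirst s out) := by unfold Spec_isFirst; infer_instance

-- ===== CLAIM (what is proved, stated in full; the proofs are below) =====
def Claim_equal_isFirst : Prop := ∀ (s : String), Dom_isFirst s → Pre_isFirst s → Spec_isFirst s (isFirst s)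
def Claim_raises_isFirst : Prop := (∀ (s : String), Dom_isFirst s → Raises_isFirst s → ¬ Pre_isFirst s) ∧ (Dom_isFirst (pvRaiseWitness_isFirst) ∧ Raises_isFirst (pvRaiseWitness_isFirst) ∧ isFirst_alt (pvRaiseWitness_isFirst) = pvRaiseWitnessOut_isFirst)

-- ===== LEMMAS AND PROOFS =====

theorem pvLoopJ_eq (t : List Char) : pvLoopJ t = if t.all pvDig then 1 else 0 := by
  induction t with
  | nil => simp [pvLoopJ]
  | cons c t ih =>
    simp only [pvLoopJ, List.all_cons, ih, pvDig]
    by_cases h0 : c < '0'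
    · simp [h0, not_le.mpr h0]
    · by_cases h9 : c > '9'
      · simp [h0, h9, not_le.mpr h9]
      · simp [h0, h9, le_of_not_gt (by exact h0), le_of_not_gt h9]

theorem pvLoopI_eq (t : List Char) : ∀ i : Nat, 1 ≤ i →
    pvLoopI t i =
      (let (r, f, q) := pvPartC t
       if f ∧ (2 ≤ i ∨ r ≠ []) ∧ r.all pvDig ∧ q.all pvDig then 1 else 0) := by
  induction t with
  | nil => intro i _; simp [pvLoopI, pvPartC]
  | cons c t ih =>
    intro i hi
    by_cases hdig : c < '0' ∨ c > '9'
    · -- c is not a digit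
      by_cases hC : c = 'C'
      · subst hC
        simp only [pvLoopI, pvPartC, if_pos hdig]
        by_cases h1 : i = 1
        · simp [h1]
        · have h2 : 2 ≤ i := by omega
          simp [h1, h2, pvLoopJ_eq]
      · -- c ≠ 'C': A returns 0; B: c::r not all digits
        have hnd : pvDig c = false := by
          rcases hdig with h | h
          · simp [pvDig, not_le.mpr h]
          · simp [pvDig, not_le.mpr h]
        simp only [pvLoopI, pvPartC, if_pos hdig, if_neg hC]
        simp [hC, hnd]
    · -- c is a digit, hence c ≠ 'C'
      have h0 : '0' ≤ c := le_of_not_gt (fun h => hdig (Or.inl h))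
      have h9 : c ≤ '9' := le_of_not_gt (fun h => hdig (Or.inr h))
      have hC : c ≠ 'C' := by
        intro h; subst h
        exact absurd h9 (by decide)
      have hd : pvDig c = true := by
        simp [pvDig, h0, h9]
      simp only [pvLoopI, pvPartC, if_neg hdig, if_neg hC]
      rw [ih (i + 1) (by omega)]
      cases hp : pvPartC t with
      | mk r fq =>
        have h2 : 2 ≤ i + 1 := by omega
        simp [h2, hd]

-- ===== VERDICT (by name: the statement is the Claim_ definition above) =====
theorem isFirst_spec : Claim_equal_isFirst := by
  intro s _ hpre
  unfold Spec_isFirst isFirst isFirst_alt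
  cases hs : s.toList with
  | nil =>
    exact absurd (String.toList_eq_nil_iff.mp hs) hpre
  | cons c0 rest =>
    by_cases hR : c0 ≠ 'R'
    · simp [hR]
    · simp only [if_neg hR]
      rw [pvLoopI_eq rest 1 (by omega)]
      cases hp : pvPartC rest with
      | mk r fq =>
        simp

@[simp] theorem isFirst_raises : Claim_raises_isFirst := by
  unfold Claim_raises_isFirst
  constructor
  · intro s _ h; simpa [Pre_isFirst, Raises_isFirst] using h
  · exact ⟨by decide, by decide, by decide⟩
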